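-- pv_equiv track=rewrite | github.com/alexbaucom17/AdventOfCode | aoc_utils/parsing.py | group_by_blank_lines
-- ===== SOURCE A (Python) =====
-- def group_by_blank_lines(rows):
--     out = []
--     tmp = []
--     for row in rows:
--         if not row.strip():
--             out.append(tmp)
--             tmp = []
--         else:
--             tmp.append(row)
--     out.append(tmp)
--     return out
-- ===== SOURCE B (Python) =====
-- def group_by_blank_lines(rows):
--     seps = [i for i, r in enumerate(rows) if not r.strip()]
--     out = []
--     start = 0
--     for s in seps:
--         out.append(rows[start:s])
--         start = s + 1
--     out.append(rows[start:])
--     return out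
-- ===== Notes on version B (the rewrite author's own statement) =====
-- stated objective: alternative
-- what changed: B first collects the indices of blank rows in one pass, then builds the groups by slicing rows between consecutive separator indices, instead of accumulating rows into a temporary group inside a single loop.
import Mathlib
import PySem

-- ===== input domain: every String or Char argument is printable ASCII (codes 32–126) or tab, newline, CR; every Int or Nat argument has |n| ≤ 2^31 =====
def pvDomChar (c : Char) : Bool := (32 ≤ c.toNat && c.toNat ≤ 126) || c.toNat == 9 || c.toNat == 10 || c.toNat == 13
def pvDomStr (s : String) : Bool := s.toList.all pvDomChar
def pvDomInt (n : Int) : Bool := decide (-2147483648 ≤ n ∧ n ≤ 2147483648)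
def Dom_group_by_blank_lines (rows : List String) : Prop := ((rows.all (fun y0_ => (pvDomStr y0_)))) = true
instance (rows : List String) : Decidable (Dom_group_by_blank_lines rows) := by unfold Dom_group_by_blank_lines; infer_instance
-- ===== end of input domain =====

-- B groups the rows by slicing between blank-line indices collected in a first pass;
-- equal return value to A's accumulate-into-tmp loop (objective: alternative decomposition).

-- 'not row.strip()' — the blank test both Pythons perform
def pvIsBlank (row : String) : Bool := (PySem.Str.strip row).toList.isEmpty

-- ===== PORT A =====
def group_by_blank_lines (rows : List String) : List (List String) :=
  let st := rows.foldl
    (fun (acc : List (List String) × List String) row =>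
      if pvIsBlank row then (acc.1 ++ [acc.2], []) else (acc.1, acc.2 ++ [row]))
    ([], [])
  st.1 ++ [st.2]

-- ===== PORT B =====
def group_by_blank_lines_alt (rows : List String) : List (List String) :=
  let seps : List Int :=
    ((PySem.List.enumerate rows 0).filter (fun p => pvIsBlank p.2)).map (·.1)
  let st := seps.foldl
    (fun (acc : List (List String) × Int) s =>
      (acc.1 ++ [PySem.List.slice rows (some acc.2) (some s)], s + 1))
    ([], 0)
  st.1 ++ [PySem.List.slice rows (some st.2) none]

-- ===== PRECONDITION & SPEC =====
def Spec_group_by_blank_lines (rows : List String) (out : List (List String)) : Prop := out = group_by_blank_lines_alt rows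
instance (rows : List String) (out : List (List String)) : Decidable (Spec_group_by_blank_lines rows out) := by unfold Spec_group_by_blank_lines; infer_instance

-- ===== CLAIM (what is proved, stated in full; the proofs are below) =====
def Claim_equal_group_by_blank_lines : Prop := ∀ (rows : List String), Dom_group_by_blank_lines rows → Spec_group_by_blank_lines rows (group_by_blank_lines rows)

-- ===== LEMMAS AND PROOFS =====

-- common reference semantics: the list of groups separated by blank rows
def pvGroups : List String → List (List String)
  | [] => [[]]
  | r :: rs =>
    if pvIsBlank r then [] :: pvGroups rs
    else match pvGroups rs with
      | [] => [[r]]      -- unreachable: pvGroups is never []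
      | g :: gs => (r :: g) :: gs

-- prepend a pending group onto the head group
def pvConsHead (t : List String) : List (List String) → List (List String)
  | [] => [t]
  | g :: gs => (t ++ g) :: gs

lemma pvGroups_ne_nil (rows : List String) : pvGroups rows ≠ [] := by
  cases rows with
  | nil => simp [pvGroups]
  | cons r rs =>
    simp only [pvGroups]
    split
    · simp
    · split <;> simp

-- positions of blank rows (relative indices)
def pvSepIdx : List String → List Nat
  | [] => []
  | r :: rs =>
    if pvIsBlank r then 0 :: (pvSepIdx rs).map (· + 1)
    else (pvSepIdx rs).map (· + 1)

lemma pvEnumFilter (rows : List String) (s : Nat) :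
    ((PySem.List.enumerate rows (s : Int)).filter (fun p => pvIsBlank p.2)).map (·.1)
      = (pvSepIdx rows).map (fun n => ((n + s : Nat) : Int)) := by
  induction rows generalizing s with
  | nil => simp [PySem.List.enumerate_nil, pvSepIdx]
  | cons r rs ih =>
    have h1 : ((s : Int) + 1) = (((s + 1 : Nat)) : Int) := by push_cast; ring
    simp only [PySem.List.enumerate_cons, List.filter_cons, pvSepIdx]
    by_cases hb : pvIsBlank r = true
    · simp only [hb, if_pos, List.map_cons, h1, ih (s + 1), List.map_map, Nat.zero_add]
      congr 1
      apply List.map_congr_left; intro n _; simp; ring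
    · simp only [hb, if_neg, Bool.false_eq_true, not_false_iff, h1, ih (s + 1), List.map_map]
      apply List.map_congr_left; intro n _; simp; ring

-- A's loop computes pvGroups
lemma pvA_loop (rows : List String) (out : List (List String)) (tmp : List String) :
    (rows.foldl
      (fun (acc : List (List String) × List String) row =>
        if pvIsBlank row then (acc.1 ++ [acc.2], []) else (acc.1, acc.2 ++ [row]))
      (out, tmp)).1
      ++ [(rows.foldl
      (fun (acc : List (List String) × List String) row =>
        if pvIsBlank row then (acc.1 ++ [acc.2], []) else (acc.1, acc.2 ++ [row]))
      (out, tmp)).2]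
      = out ++ pvConsHead tmp (pvGroups rows) := by
  induction rows generalizing out tmp with
  | nil => simp [pvConsHead, pvGroups]
  | cons r rs ih =>
    simp only [List.foldl_cons]
    by_cases hb : pvIsBlank r = true
    · simp only [hb, if_pos, ih]
      obtain ⟨g, gs, hg⟩ : ∃ g gs, pvGroups rs = g :: gs := by
        cases h : pvGroups rs with
        | nil => exact absurd h (pvGroups_ne_nil rs)
        | cons g gs => exact ⟨g, gs, rfl⟩
      simp [pvGroups, hb, hg, pvConsHead]
    · simp only [hb, if_neg, Bool.false_eq_true, not_false_iff, ih]
      obtain ⟨g, gs, hg⟩ : ∃ g gs, pvGroups rs = g :: gs := by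
        cases h : pvGroups rs with
        | nil => exact absurd h (pvGroups_ne_nil rs)
        | cons g gs => exact ⟨g, gs, rfl⟩
      simp [pvGroups, hb, hg, pvConsHead]

-- B's loop over the shifted separator indices computes pvGroups of the remaining suffix
lemma pvB_loop (rest : List String) (k j : Nat) (R : List String)
    (out : List (List String)) (hjk : j ≤ k) (hdrop : R.drop k = rest) :
    (((pvSepIdx rest).map (fun n => ((n + k : Nat) : Int))).foldl
        (fun (acc : List (List String) × Int) s =>
          (acc.1 ++ [PySem.List.slice R (some acc.2) (some s)], s + 1))
        (out, (j : Int))).1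
      ++ [PySem.List.slice R
            (some (((pvSepIdx rest).map (fun n => ((n + k : Nat) : Int))).foldl
              (fun (acc : List (List String) × Int) s =>
                (acc.1 ++ [PySem.List.slice R (some acc.2) (some s)], s + 1))
              (out, (j : Int))).2) none]
      = out ++ pvConsHead ((R.drop j).take (k - j)) (pvGroups rest) := by
  induction rest generalizing k j out with
  | nil =>
    have hlen : R.length ≤ k := by
      have := congrArg List.length hdrop
      simp at this; omega
    have htk : (R.drop j).take (k - j) = R.drop j :=
      List.take_of_length_le (by simp; omega)
    simp [pvSepIdx, pvGroups, pvConsHead, PySem.List.slice_from_natCast, htk]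
  | cons r rs ih =>
    have hdrop' : R.drop (k + 1) = rs := by
      have : R.drop (k + 1) = (R.drop k).drop 1 := by
        rw [List.drop_drop]
      rw [this, hdrop]; rfl
    have hget : R[k]? = some r := by
      have : (R.drop k)[0]? = R[k]? := by simp
      rw [← this, hdrop]; rfl
    by_cases hb : pvIsBlank r = true
    · -- first separator is at index k
      have h1 : ((k : Int) + 1) = (((k + 1 : Nat)) : Int) := by push_cast; ring
      have hmap : ((pvSepIdx rs).map (· + 1)).map (fun n => ((n + k : Nat) : Int))
          = (pvSepIdx rs).map (fun n => ((n + (k + 1) : Nat) : Int)) := by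
        rw [List.map_map]; apply List.map_congr_left; intro n _; simp; ring
      simp only [pvSepIdx, hb, if_pos, List.map_cons, List.foldl_cons, hmap, Nat.zero_add]
      rw [h1]
      rw [ih (k + 1) (k + 1) (out ++ [PySem.List.slice R (some (j : Int)) (some (k : Int))]) (le_refl _) hdrop']
      obtain ⟨g, gs, hg⟩ : ∃ g gs, pvGroups rs = g :: gs := by
        cases h : pvGroups rs with
        | nil => exact absurd h (pvGroups_ne_nil rs)
        | cons g gs => exact ⟨g, gs, rfl⟩
      simp [pvGroups, hb, hg, pvConsHead, PySem.List.slice_natCast]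
    · -- r joins the pending group
      have hmap : ((pvSepIdx rs).map (· + 1)).map (fun n => ((n + k : Nat) : Int))
          = (pvSepIdx rs).map (fun n => ((n + (k + 1) : Nat) : Int)) := by
        rw [List.map_map]; apply List.map_congr_left; intro n _; simp; ring
      simp only [pvSepIdx, hb, if_neg, Bool.false_eq_true, not_false_iff, hmap]
      rw [ih (k + 1) j out (by omega) hdrop']
      obtain ⟨g, gs, hg⟩ : ∃ g gs, pvGroups rs = g :: gs := by
        cases h : pvGroups rs with
        | nil => exact absurd h (pvGroups_ne_nil rs)
        | cons g gs => exact ⟨g, gs, rfl⟩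
      have htake : (R.drop j).take (k + 1 - j) = (R.drop j).take (k - j) ++ [r] := by
        have hkj : k + 1 - j = (k - j) + 1 := by omega
        have hgd : (R.drop j)[k - j]? = some r := by
          rw [List.getElem?_drop]
          have : j + (k - j) = k := by omega
          rw [this, hget]
        rw [hkj, List.take_add_one, hgd]; rfl
      simp [pvGroups, hb, hg, pvConsHead, htake, List.append_assoc]

-- ===== VERDICT (by name: the statement is the Claim_ definition above) =====
theorem group_by_blank_lines_spec : Claim_equal_group_by_blank_lines := by
  intro rows _
  unfold Spec_group_by_blank_lines group_by_blank_lines group_by_blank_lines_alt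
  simp only []
  rw [pvA_loop rows [] []]
  have henum := pvEnumFilter rows 0
  have h0 : ((0 : Nat) : Int) = (0 : Int) := rfl
  rw [h0] at henum
  rw [henum]
  have hB := pvB_loop rows 0 0 rows [] (le_refl 0) (by simp)
  simp only [Nat.cast_zero] at hB
  rw [hB]
  obtain ⟨g, gs, hg⟩ : ∃ g gs, pvGroups rows = g :: gs := by
    cases h : pvGroups rows with
    | nil => exact absurd h (pvGroups_ne_nil rows)
    | cons g gs => exact ⟨g, gs, rfl⟩
  simp [hg, pvConsHead]
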